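-- pv_equiv track=rewrite | github.com/rohitbhintade/kiss_ai | src/kiss/agents/vscode/helpers.py | rank_file_suggestions
-- ===== SOURCE A (Python) =====
-- def rank_file_suggestions(
--     file_cache: list[str],
--     query: str,
--     usage: dict[str, int],
--     limit: int = 20,
-- ) -> list[dict[str, str]]:
--     """Rank and filter file paths by query match, recency, and usage.
--
--     Args:
--         file_cache: List of file paths to search.
--         query: Case-sensitive substring to match against paths.
--         usage: File usage counts keyed by path (insertion order
--             encodes recency, last key = most recently used).
--         limit: Maximum number of results to return.
--
--     Returns:
--         Sorted list of dicts with ``type`` (``"frequent"`` or ``"file"``)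
--         and ``text`` keys.
--     """
--     frequent: list[dict[str, str]] = []
--     rest: list[dict[str, str]] = []
--     for path in file_cache:
--         if not query or query in path:
--             item: dict[str, str] = {"type": "file", "text": path}
--             if usage.get(path, 0) > 0:
--                 frequent.append(item)
--             else:
--                 rest.append(item)
--
--     def _end_dist(text: str) -> int:
--         if not query:
--             return 0
--         pos = text.rfind(query)
--         if pos < 0:  # pragma: no cover — files are pre-filtered by query match
--             return len(text)
--         return len(text) - (pos + len(query))
--
--     _usage_keys = list(usage.keys())
--     _recency = {k: i for i, k in enumerate(reversed(_usage_keys))}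
--     _n = len(_usage_keys)
--     frequent.sort(
--         key=lambda m: (
--             _end_dist(m["text"]),
--             _recency.get(m["text"], _n),
--             -usage.get(m["text"], 0),
--         )
--     )
--     rest.sort(key=lambda m: _end_dist(m["text"]))
--     for f in frequent:
--         f["type"] = "frequent"
--     return (frequent + rest)[:limit]
-- ===== SOURCE B (Python) =====
-- def rank_file_suggestions(
--     file_cache: list[str],
--     query: str,
--     usage: dict[str, int],
--     limit: int = 20,
-- ) -> list[dict[str, str]]:
--     """Counting-based variant: no recency-rank dict, no composite sort keys.
--
--     Frequent paths are multiset-counted, then emitted by walking the usage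
--     keys newest-first (a counting pass replaces the recency/usage tie-break
--     keys), and one stable end-distance sort per group finishes the ranking.
--     """
--
--     def _end_dist(text: str) -> int:
--         if not query:
--             return 0
--         pos = text.rfind(query)
--         if pos < 0:
--             return len(text)
--         return len(text) - (pos + len(query))
--
--     freq: list[str] = []
--     rest: list[str] = []
--     for p in file_cache:
--         if not query or query in p:
--             if usage.get(p, 0) > 0:
--                 freq.append(p)
--             else:
--                 rest.append(p)
--
--     cnt: dict[str, int] = {}
--     for p in freq:
--         cnt[p] = cnt.get(p, 0) + 1
--
--     ordered: list[str] = []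
--     for k in reversed(list(usage)):
--         ordered += [k] * cnt.get(k, 0)
--     ordered.sort(key=_end_dist)
--     rest.sort(key=_end_dist)
--
--     out = [{"type": "frequent", "text": p} for p in ordered]
--     out += [{"type": "file", "text": p} for p in rest]
--     return out[:limit]
-- ===== Notes on version B (the rewrite author's own statement) =====
-- stated objective: alternative
-- what changed: B eliminates A's recency-rank dict and composite (end_dist, recency, -usage) sort keys: frequent paths are multiset-counted into a plain dict, emitted by walking the usage keys newest-first (a counting pass that replaces the recency/usage tie-break keys entirely, valid because recency ranks are distinct per path and equal paths yield identical result dicts), and one stable end-distance sort per group finishes the ranking.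
import Mathlib
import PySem

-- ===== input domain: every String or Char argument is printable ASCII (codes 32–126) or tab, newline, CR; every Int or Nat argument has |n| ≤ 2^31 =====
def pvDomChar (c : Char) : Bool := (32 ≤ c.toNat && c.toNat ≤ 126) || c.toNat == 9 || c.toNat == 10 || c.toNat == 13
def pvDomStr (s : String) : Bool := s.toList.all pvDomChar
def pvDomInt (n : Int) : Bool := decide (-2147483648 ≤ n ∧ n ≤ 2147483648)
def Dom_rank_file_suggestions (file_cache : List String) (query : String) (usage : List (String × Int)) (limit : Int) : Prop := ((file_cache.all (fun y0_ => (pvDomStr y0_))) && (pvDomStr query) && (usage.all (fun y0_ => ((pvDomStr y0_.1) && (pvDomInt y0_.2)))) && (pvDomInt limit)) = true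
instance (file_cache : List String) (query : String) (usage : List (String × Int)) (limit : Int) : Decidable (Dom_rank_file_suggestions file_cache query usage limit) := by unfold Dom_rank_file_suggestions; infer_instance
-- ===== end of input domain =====

-- B replaces A's recency-rank dict and composite (end,recency,-usage) sort keys by a counting
-- pass: frequent paths are multiset-counted and emitted by walking the usage keys newest-first,
-- then one stable end-distance sort per group finishes the ranking (objective: alternative).

-- ===== PORT A =====
-- helper shared verbatim by both Pythons: the local `_end_dist` closure
def pvEndDist (query text : String) : Int :=
  if query = "" then 0
  else
    let pos := PySem.Str.rfind text query
    if pos < 0 then PySem.Str.len text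
    else PySem.Str.len text - (pos + PySem.Str.len query)

-- A's `_recency = {k: i for i, k in enumerate(reversed(_usage_keys))}`
def pvRecency (usage : List (String × Int)) : PySem.Dict String Int :=
  (PySem.List.enumerate ((PySem.Dict.ofList usage).keys.reverse) 0).foldl
    (fun d p => d.insert p.2 p.1) PySem.Dict.empty

def rank_file_suggestions (file_cache : List String) (query : String) (usage : List (String × Int)) (limit : Int) : List (List (String × String)) :=
  let d := PySem.Dict.ofList usage
  let fr := file_cache.foldl
    (fun (acc : List (PySem.Dict String String) × List (PySem.Dict String String)) path =>
      if query = "" ∨ PySem.Str.isIn query path then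
        let item := PySem.Dict.ofList [("type", "file"), ("text", path)]
        if d.getD path 0 > 0 then (acc.1 ++ [item], acc.2)
        else (acc.1, acc.2 ++ [item])
      else acc) ([], [])
  let usageKeys := d.keys
  let recency := pvRecency usage
  let n : Int := usageKeys.length
  -- m["text"] can never miss (items always carry "text"), so getD is exact here
  let frequent := PySem.List.sorted fr.1 (fun m =>
      [pvEndDist query (m.getD "text" ""),
       recency.getD (m.getD "text" "") n,
       -(d.getD (m.getD "text" "") 0)]) false
  let rest := PySem.List.sorted fr.2 (fun m => pvEndDist query (m.getD "text" "")) false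
  let frequent2 := frequent.map (fun f => f.insert "type" "frequent")
  (PySem.List.slice (frequent2 ++ rest) none (some limit)).map PySem.Dict.items

-- ===== PORT B =====
def rank_file_suggestions_alt (file_cache : List String) (query : String) (usage : List (String × Int)) (limit : Int) : List (List (String × String)) :=
  let d := PySem.Dict.ofList usage
  let fr := file_cache.foldl
    (fun (acc : List String × List String) p =>
      if query = "" ∨ PySem.Str.isIn query p then
        if d.getD p 0 > 0 then (acc.1 ++ [p], acc.2)
        else (acc.1, acc.2 ++ [p])
      else acc) ([], [])
  let cnt := fr.1.foldl (fun (c : PySem.Dict String Int) p => c.modify p 0 (· + 1)) PySem.Dict.empty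
  let ordered := d.keys.reverse.foldl
    (fun (acc : List String) k => acc ++ PySem.List.pyRepeat [k] (cnt.getD k 0)) []
  let ordered2 := PySem.List.sorted ordered (fun p => pvEndDist query p) false
  let rest2 := PySem.List.sorted fr.2 (fun p => pvEndDist query p) false
  let out := ordered2.map (fun p => PySem.Dict.ofList [("type", "frequent"), ("text", p)]) ++
             rest2.map (fun p => PySem.Dict.ofList [("type", "file"), ("text", p)])
  (PySem.List.slice out none (some limit)).map PySem.Dict.items

-- ===== PRECONDITION & SPEC =====
def Spec_rank_file_suggestions (file_cache : List String) (query : String) (usage : List (String × Int)) (limit : Int) (out : List (List (String × String))) : Prop := out = rank_file_suggestions_alt file_cache query usage limit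
instance (file_cache : List String) (query : String) (usage : List (String × Int)) (limit : Int) (out : List (List (String × String))) : Decidable (Spec_rank_file_suggestions file_cache query usage limit out) := by unfold Spec_rank_file_suggestions; infer_instance

-- ===== CLAIM (what is proved, stated in full; the proofs are below) =====
def Claim_equal_rank_file_suggestions : Prop := ∀ (file_cache : List String) (query : String) (usage : List (String × Int)) (limit : Int), Dom_rank_file_suggestions file_cache query usage limit → Spec_rank_file_suggestions file_cache query usage limit (rank_file_suggestions file_cache query usage limit)

-- ===== LEMMAS AND PROOFS =====

-- shorthand notions used only by the proofs
def pvU (usage : List (String × Int)) (p : String) : Int := (PySem.Dict.ofList usage).getD p 0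

def pvRk (usage : List (String × Int)) : List String := (PySem.Dict.ofList usage).keys.reverse

def pvKey3 (query : String) (usage : List (String × Int)) (p : String) : List Int :=
  [pvEndDist query p,
   (pvRecency usage).getD p ((PySem.Dict.ofList usage).keys.length : Int),
   -(pvU usage p)]

-- the two sorts only differ in the (propositionally unique) Decidable instance
theorem pv_sorted_inst {α κ : Type} [i : LT κ] {d1 d2 : ∀ a b : κ, Decidable (a < b)}
    (l : List α) (key : α → κ) (rev : Bool) :
    @PySem.List.sorted α κ i d1 l key rev = @PySem.List.sorted α κ i d2 l key rev := by
  congr 1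

theorem pv_insertBy_map {α β κ : Type} [LT κ] [DecidableLT κ] (key : β → κ) (bf' : α → α → Bool) (f : α → β)
    (x : α) (ys : List α) (h : ∀ a b : α, decide (key (f a) < key (f b)) = bf' a b) :
    PySem.List.insertBy (fun a b => decide (key a < key b)) (f x) (ys.map f)
      = (PySem.List.insertBy bf' x ys).map f := by
  induction ys with
  | nil => rfl
  | cons y ys ih =>
    simp only [List.map_cons, PySem.List.insertBy, h]
    by_cases hb : bf' x y = true
    · simp [hb]
    · simp only [Bool.not_eq_true] at hb
      simp [hb, ih]

theorem pv_sorted_snoc {α κ : Type} [LT κ] [DecidableLT κ] (l : List α) (x : α) (key : α → κ) :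
    PySem.List.sorted (l ++ [x]) key false =
      PySem.List.insertBy (fun a b => decide (key a < key b)) x (PySem.List.sorted l key false) := by
  rw [PySem.List.sorted_eq_foldl_insertBy, PySem.List.sorted_eq_foldl_insertBy, List.foldl_append]
  rfl

-- stable sort of a mapped list
theorem pv_sorted_map {α β κ : Type} [LT κ] [DecidableLT κ] (l : List α) (f : α → β) (key : β → κ) :
    PySem.List.sorted (l.map f) key false =
      (PySem.List.sorted l (fun x => key (f x)) false).map f := by
  induction l using List.reverseRecOn with
  | nil => rfl
  | append_singleton l x ih =>
    rw [List.map_append, List.map_singleton, pv_sorted_snoc, pv_sorted_snoc, ih,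
      pv_insertBy_map (bf' := fun a b => decide (key (f a) < key (f b)))]
    intro a b; rfl

-- xs[:b] commutes with map
theorem pv_slice_map {α β : Type} (f : α → β) (xs : List α) (b : Option Int) :
    (PySem.List.slice xs none b).map f = PySem.List.slice (xs.map f) none b := by
  cases b <;> simp [PySem.List.slice, List.map_take]

-- A's collection loop
theorem pv_loopA (query : String) (usage : List (String × Int)) (l : List String)
    (F R : List (PySem.Dict String String)) :
    l.foldl
      (fun (acc : List (PySem.Dict String String) × List (PySem.Dict String String)) path =>
        if query = "" ∨ PySem.Str.isIn query path then
          if (PySem.Dict.ofList usage).getD path 0 > 0 then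
            (acc.1 ++ [PySem.Dict.ofList [("type", "file"), ("text", path)]], acc.2)
          else (acc.1, acc.2 ++ [PySem.Dict.ofList [("type", "file"), ("text", path)]])
        else acc) (F, R) =
    (F ++ ((l.filter (fun p => decide (query = "" ∨ PySem.Str.isIn query p))).filter
        (fun p => decide (pvU usage p > 0))).map
        (fun p => PySem.Dict.ofList [("type", "file"), ("text", p)]),
     R ++ ((l.filter (fun p => decide (query = "" ∨ PySem.Str.isIn query p))).filter
        (fun p => !decide (pvU usage p > 0))).map
        (fun p => PySem.Dict.ofList [("type", "file"), ("text", p)])) := by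
  induction l generalizing F R with
  | nil => simp
  | cons p l ih =>
    rw [List.foldl_cons]
    by_cases hm : query = "" ∨ PySem.Str.isIn query p
    · rw [if_pos hm, List.filter_cons_of_pos (by simpa using hm)]
      by_cases hu : pvU usage p > 0
      · rw [if_pos (by simpa [pvU] using hu), ih,
          List.filter_cons_of_pos (by simpa using hu),
          List.filter_cons_of_neg (by simpa using hu)]
        simp
      · rw [if_neg (by simpa [pvU] using hu), ih,
          List.filter_cons_of_neg (by simpa using hu),
          List.filter_cons_of_pos (by simpa using hu)]
        simp
    · rw [if_neg hm, ih, List.filter_cons_of_neg (by simpa using hm)]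

-- B's collection loop
theorem pv_loopB (query : String) (usage : List (String × Int)) (l : List String)
    (F R : List String) :
    l.foldl
      (fun (acc : List String × List String) p =>
        if query = "" ∨ PySem.Str.isIn query p then
          if (PySem.Dict.ofList usage).getD p 0 > 0 then (acc.1 ++ [p], acc.2)
          else (acc.1, acc.2 ++ [p])
        else acc) (F, R) =
    (F ++ (l.filter (fun p => decide (query = "" ∨ PySem.Str.isIn query p))).filter
        (fun p => decide (pvU usage p > 0)),
     R ++ (l.filter (fun p => decide (query = "" ∨ PySem.Str.isIn query p))).filter
        (fun p => !decide (pvU usage p > 0))) := by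
  induction l generalizing F R with
  | nil => simp
  | cons p l ih =>
    rw [List.foldl_cons]
    by_cases hm : query = "" ∨ PySem.Str.isIn query p
    · rw [if_pos hm, List.filter_cons_of_pos (by simpa using hm)]
      by_cases hu : pvU usage p > 0
      · rw [if_pos (by simpa [pvU] using hu), ih,
          List.filter_cons_of_pos (by simpa using hu),
          List.filter_cons_of_neg (by simpa using hu)]
        simp
      · rw [if_neg (by simpa [pvU] using hu), ih,
          List.filter_cons_of_neg (by simpa using hu),
          List.filter_cons_of_pos (by simpa using hu)]
        simp
    · rw [if_neg hm, ih, List.filter_cons_of_neg (by simpa using hm)]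

-- the recency dict is an index into the reversed key list
theorem pv_enumFold_getD (l : List String) :
    ∀ (s : Int) (D : PySem.Dict String Int) (k : String) (d : Int), l.Nodup →
    ((PySem.List.enumerate l s).foldl (fun d p => d.insert p.2 p.1) D).getD k d
      = if k ∈ l then s + (l.idxOf k : Int) else D.getD k d := by
  induction l with
  | nil => intro s D k d _; simp [PySem.List.enumerate]
  | cons x l ih =>
    intro s D k d hnd
    rw [PySem.List.enumerate_cons, List.foldl_cons]
    rcases List.nodup_cons.mp hnd with ⟨hx, hnd'⟩
    rw [ih (s + 1) _ k d hnd']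
    by_cases hk : k ∈ l
    · have hne : k ≠ x := fun h => hx (h ▸ hk)
      rw [if_pos hk, if_pos (List.mem_cons_of_mem _ hk), List.idxOf_cons_ne _ (fun h => hne h.symm)]
      push_cast
      ring
    · rw [if_neg hk]
      by_cases hkx : k = x
      · subst hkx
        rw [if_pos (List.mem_cons_self), List.idxOf_cons_self, PySem.Dict.getD_insert]
        simp
      · rw [if_neg (by simp [hkx, hk]), PySem.Dict.getD_insert, if_neg hkx]

theorem pv_rk_nodup (usage : List (String × Int)) : (pvRk usage).Nodup :=
  List.nodup_reverse.mpr (PySem.Dict.nodup_keys_ofList usage)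

theorem pv_recency_getD (usage : List (String × Int)) (k : String) (d : Int) :
    (pvRecency usage).getD k d
      = if k ∈ pvRk usage then ((pvRk usage).idxOf k : Int) else d := by
  rw [pvRecency, show (PySem.Dict.ofList usage).keys.reverse = pvRk usage from rfl,
    pv_enumFold_getD _ 0 _ k d (pv_rk_nodup usage)]
  by_cases hk : k ∈ pvRk usage
  · rw [if_pos hk, if_pos hk]
    simp
  · rw [if_neg hk, if_neg hk, PySem.Dict.getD_empty]

theorem pv_mem_rk_of_u_pos (usage : List (String × Int)) (p : String) (h : pvU usage p > 0) :
    p ∈ pvRk usage := by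
  rw [pvRk, List.mem_reverse]
  by_contra hm
  have hc : (PySem.Dict.ofList usage).contains p = false := by
    rw [PySem.Dict.contains_eq_decide_mem_keys]
    simp [hm]
  rw [pvU, PySem.Dict.getD_of_not_contains _ _ hc] at h
  omega

theorem pv_rk_inj (usage : List (String × Int)) (a : String) (ha : a ∈ pvRk usage)
    (b : String) (_hb : b ∈ pvRk usage) (h : (pvRk usage).idxOf a = (pvRk usage).idxOf b) :
    a = b :=
  (List.idxOf_inj (l := pvRk usage) ha).mp h

-- uniqueness of a sorted arrangement up to member-level antisymmetry
theorem pv_eq_of_perm_pairwise {α : Type} (R : α → α → Prop) :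
    ∀ (l1 l2 : List α), l1.Perm l2 → l1.Pairwise R → l2.Pairwise R →
      (∀ a ∈ l1, ∀ b ∈ l1, R a b → R b a → a = b) → l1 = l2 := by
  intro l1
  induction l1 with
  | nil => intro l2 hp _ _ _; exact (hp.nil_eq).symm ▸ rfl
  | cons a t1 ih =>
    intro l2 hp h1 h2 hanti
    cases l2 with
    | nil => exact absurd hp.symm.nil_eq (by simp)
    | cons b t2 =>
      rcases List.pairwise_cons.mp h1 with ⟨ha1, ht1⟩
      rcases List.pairwise_cons.mp h2 with ⟨hb2, ht2⟩
      have hab : a = b := by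
        by_contra hne
        have haT2 : a ∈ t2 := by
          have haIn : a ∈ b :: t2 := hp.mem_iff.mp List.mem_cons_self
          rcases List.mem_cons.mp haIn with h' | h'
          · exact absurd h' hne
          · exact h'
        have hbT1 : b ∈ t1 := by
          have hbIn : b ∈ a :: t1 := hp.symm.mem_iff.mp List.mem_cons_self
          rcases List.mem_cons.mp hbIn with h' | h'
          · exact absurd h'.symm hne
          · exact h'
        exact hne (hanti a List.mem_cons_self b (List.mem_cons_of_mem _ hbT1)
          (ha1 b hbT1) (hb2 a haT2))
      subst hab
      have hperm : t1.Perm t2 := hp.cons_inv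
      rw [ih t2 hperm ht1 ht2
        (fun x hx y hy => hanti x (by simp [hx]) y (by simp [hy]))]

-- counting characterization of the newest-first emission loop
theorem pv_count_flatMap_replicate (c : String → Nat) (rk : List String) (hnd : rk.Nodup)
    (a : String) :
    (rk.flatMap (fun k => List.replicate (c k) k)).count a = if a ∈ rk then c a else 0 := by
  induction rk with
  | nil => simp
  | cons k rk ih =>
    rcases List.nodup_cons.mp hnd with ⟨hk, hnd'⟩
    rw [List.flatMap_cons, List.count_append, ih hnd', List.count_replicate]
    by_cases hak : a = k
    · subst hak
      simp [hk]
    · have hka : ¬ k = a := fun h => hak h.symm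
      by_cases ha : a ∈ rk <;> simp [hak, ha, hka]

theorem pv_perm_flatMap_replicate (l rk : List String) (hnd : rk.Nodup)
    (hsub : ∀ p ∈ l, p ∈ rk) :
    (rk.flatMap (fun k => List.replicate (l.count k) k)).Perm l := by
  rw [List.perm_iff_count]
  intro a
  rw [pv_count_flatMap_replicate (fun k => l.count k) rk hnd a]
  by_cases h : a ∈ rk
  · rw [if_pos h]
  · rw [if_neg h]
    exact (List.count_eq_zero.mpr (fun hm => h (hsub a hm))).symm

theorem pv_replicate_pairwise {α : Type} (n : Nat) (a : α) (R : α → α → Prop) (h : R a a) :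
    (List.replicate n a).Pairwise R := by
  induction n with
  | zero => simp
  | succ n ih =>
    simp only [List.replicate_succ, List.pairwise_cons]
    exact ⟨fun b hb => (List.eq_of_mem_replicate hb) ▸ h, ih⟩

theorem pv_rk_pairwise_idx (rk : List String) (hnd : rk.Nodup) :
    rk.Pairwise (fun a b => rk.idxOf a < rk.idxOf b) := by
  rw [List.pairwise_iff_getElem]
  intro i j hi hj hij
  rw [List.Nodup.idxOf_getElem hnd i hi, List.Nodup.idxOf_getElem hnd j hj]
  exact hij

theorem pv_G_pairwise (c : String → Nat) (rk : List String) (hnd : rk.Nodup) :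
    (rk.flatMap (fun k => List.replicate (c k) k)).Pairwise
      (fun a b => rk.idxOf a ≤ rk.idxOf b) := by
  rw [List.pairwise_flatMap]
  refine ⟨fun a _ => pv_replicate_pairwise _ _ _ le_rfl, ?_⟩
  refine (pv_rk_pairwise_idx rk hnd).imp ?_
  intro a b hab x hx y hy
  rw [List.eq_of_mem_replicate hx, List.eq_of_mem_replicate hy]
  exact le_of_lt hab

-- insertion keeps the "strictly-less or key-tie in input order" invariant
theorem pv_insertBy_stable {α : Type} (key : α → Int) (Q : α → α → Prop) (x : α) :
    ∀ (ys : List α),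
      ys.Pairwise (fun a b => key a < key b ∨ (key a = key b ∧ Q a b)) →
      (∀ y ∈ ys, Q y x) →
      (PySem.List.insertBy (fun a b => decide (key a < key b)) x ys).Pairwise
        (fun a b => key a < key b ∨ (key a = key b ∧ Q a b)) := by
  intro ys
  induction ys with
  | nil => intro _ _; simp [PySem.List.insertBy]
  | cons y ys ih =>
    intro hys hQ
    rcases List.pairwise_cons.mp hys with ⟨hy, hys'⟩
    simp only [PySem.List.insertBy]
    by_cases hb : key x < key y
    · rw [if_pos (by simpa using hb)]
      refine List.pairwise_cons.mpr ⟨?_, hys⟩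
      intro z hz
      rcases List.mem_cons.mp hz with rfl | hz
      · exact Or.inl hb
      · rcases hy z hz with h | h
        · exact Or.inl (lt_trans hb h)
        · exact Or.inl (h.1 ▸ hb)
    · rw [if_neg (by simpa using hb)]
      refine List.pairwise_cons.mpr
        ⟨?_, ih hys' (fun z hz => hQ z (List.mem_cons_of_mem _ hz))⟩
      intro z hz
      rcases (PySem.List.mem_insertBy _ _ _ _).mp hz with rfl | hz
      · rcases lt_or_ge (key y) (key z) with h | h
        · exact Or.inl h
        · exact Or.inr ⟨le_antisymm (not_lt.mp hb) h, hQ y (by simp)⟩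
      · exact hy z hz

-- stability of the PySem insertion sort, in the form the proof needs
theorem pv_sorted_stable {α : Type} (l : List α) (key : α → Int) (Q : α → α → Prop)
    (h : l.Pairwise Q) :
    (PySem.List.sorted l key false).Pairwise
      (fun a b => key a < key b ∨ (key a = key b ∧ Q a b)) := by
  induction l using List.reverseRecOn with
  | nil => simp [PySem.List.sorted]
  | append_singleton l x ih =>
    rcases List.pairwise_append.mp h with ⟨hl, _, hlx⟩
    rw [pv_sorted_snoc]
    refine pv_insertBy_stable key Q x _ (ih hl) ?_
    intro y hy
    exact hlx y ((PySem.List.mem_sorted _ _ _ _).mp hy) x (by simp)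

-- lexicographic facts on the three-component keys
theorem pv_le3_of_lt1 (a1 a2 a3 b1 b2 b3 : Int) (h : a1 < b1) :
    ([a1, a2, a3] : List Int) ≤ [b1, b2, b3] := by
  apply le_of_lt
  simp [List.cons_lt_cons_iff]
  omega

theorem pv_le3_of_lt2 (a1 a2 a3 b1 b2 b3 : Int) (h : a1 = b1) (h2 : a2 < b2) :
    ([a1, a2, a3] : List Int) ≤ [b1, b2, b3] := by
  apply le_of_lt
  simp [List.cons_lt_cons_iff]
  omega

-- dict computation on the two-field items
theorem pv_item_text (p : String) :
    (PySem.Dict.ofList [("type", "file"), ("text", p)]).getD "text" "" = p := rfl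

-- THE CORE: A's composite-key sort of the frequent paths equals B's
-- count-and-emit list sorted by end distance alone.
theorem pv_core (query : String) (usage : List (String × Int)) (fp : List String)
    (hfp : ∀ p ∈ fp, pvU usage p > 0) :
    PySem.List.sorted fp (fun p => pvKey3 query usage p) false
      = PySem.List.sorted
          ((pvRk usage).flatMap (fun k => List.replicate (fp.count k) k))
          (fun p => pvEndDist query p) false := by
  have hndrk := pv_rk_nodup usage
  have hsub : ∀ p ∈ fp, p ∈ pvRk usage := fun p hp => pv_mem_rk_of_u_pos usage p (hfp p hp)
  have hGmem : ∀ p ∈ (pvRk usage).flatMap (fun k => List.replicate (fp.count k) k), p ∈ pvRk usage := by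
    intro p hp
    rcases List.mem_flatMap.mp hp with ⟨k, hk, hpk⟩
    rwa [List.eq_of_mem_replicate hpk]
  have hkey : ∀ p ∈ pvRk usage, pvKey3 query usage p
      = [pvEndDist query p, ((pvRk usage).idxOf p : Int), -(pvU usage p)] := by
    intro p hp
    simp [pvKey3, pv_recency_getD, hp]
  apply pv_eq_of_perm_pairwise (fun a b => pvKey3 query usage a ≤ pvKey3 query usage b)
  · exact (PySem.List.sorted_perm _ _ _).trans
      ((pv_perm_flatMap_replicate fp (pvRk usage) hndrk hsub).symm.trans
        (PySem.List.sorted_perm _ _ _).symm)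
  · rw [pv_sorted_inst (d2 := fun a b => (List.instLinearOrder.toDecidableLT : DecidableLT (List Int)) a b)]
    exact PySem.List.sorted_pairwise fp (fun p => pvKey3 query usage p)
  · have hQ : ((pvRk usage).flatMap (fun k => List.replicate (fp.count k) k)).Pairwise
        (fun a b => (pvRk usage).idxOf a ≤ (pvRk usage).idxOf b) :=
      pv_G_pairwise (fun k => fp.count k) (pvRk usage) hndrk
    have hstab := pv_sorted_stable _ (fun p => pvEndDist query p) _ hQ
    refine List.Pairwise.imp_of_mem ?_ hstab
    intro a b ha hb hab
    have haR := hGmem a ((PySem.List.mem_sorted _ _ _ _).mp ha)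
    have hbR := hGmem b ((PySem.List.mem_sorted _ _ _ _).mp hb)
    rcases hab with h | ⟨he, hidx⟩
    · rw [hkey a haR, hkey b hbR]
      exact pv_le3_of_lt1 _ _ _ _ _ _ h
    · rcases lt_or_eq_of_le hidx with h | h
      · rw [hkey a haR, hkey b hbR]
        exact pv_le3_of_lt2 _ _ _ _ _ _ he (by exact_mod_cast h)
      · rw [pv_rk_inj usage a haR b hbR h]
  · intro a ha b hb h1 h2
    have haR := hsub a ((PySem.List.mem_sorted _ _ _ _).mp ha)
    have hbR := hsub b ((PySem.List.mem_sorted _ _ _ _).mp hb)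
    have heq := le_antisymm h1 h2
    rw [hkey a haR, hkey b hbR] at heq
    simp only [List.cons.injEq] at heq
    exact pv_rk_inj usage a haR b hbR (by exact_mod_cast heq.2.1)

theorem rank_main (file_cache : List String) (query : String) (usage : List (String × Int))
    (limit : Int) :
    rank_file_suggestions file_cache query usage limit =
      rank_file_suggestions_alt file_cache query usage limit := by
  unfold rank_file_suggestions rank_file_suggestions_alt
  simp only []
  rw [pv_loopA query usage file_cache [] [], pv_loopB query usage file_cache [] []]
  simp only [List.nil_append]
  rw [← PySem.Dict.counter_eq_foldl, PySem.List.foldl_append_eq_flatMap]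
  simp only [List.nil_append, PySem.List.pyRepeat_singleton, PySem.Dict.getD_counter,
    Int.toNat_natCast]
  rw [pv_sorted_map, pv_sorted_map]
  simp only [pv_item_text]
  have hfp : ∀ p ∈ (List.filter (fun p => decide (pvU usage p > 0))
      (List.filter (fun p => decide (query = "" ∨ PySem.Str.isIn query p = true)) file_cache)),
      pvU usage p > 0 :=
    fun p hp => of_decide_eq_true (List.mem_filter.mp hp).2
  have hc := pv_core query usage _ hfp
  simp only [pvRk] at hc
  rw [show (fun x => [pvEndDist query x,
      (pvRecency usage).getD x ((PySem.Dict.ofList usage).keys.length : Int),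
      -(PySem.Dict.ofList usage).getD x 0]) = (fun p => pvKey3 query usage p) from rfl]
  rw [hc]
  rw [pv_slice_map, pv_slice_map]
  congr 1
  simp only [List.map_append, List.map_map]
  rfl

-- ===== VERDICT (by name: the statement is the Claim_ definition above) =====
theorem rank_file_suggestions_spec : Claim_equal_rank_file_suggestions := by
  intro fc q us lim _
  unfold Spec_rank_file_suggestions
  exact rank_main fc q us lim
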